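-- pv_equiv track=rewrite | github.com/rayaneweb/puissance4 | ia_engine.py | _find_all_immediate_wins
-- ===== SOURCE A (Python) =====
-- from typing import Optional
--
-- EMPTY = "."
--
-- CONNECT_N = 4
--
-- def valid_columns(board: list) -> list:
--     if not board or not board[0]:
--         return []
--     return [c for c in range(len(board[0])) if board[0][c] == EMPTY]
--
-- def drop_in_grid(grid: list, col: int, token: str) -> Optional[tuple]:
--     for r in range(len(grid) - 1, -1, -1):
--         if grid[r][col] == EMPTY:
--             grid[r][col] = token
--             return (r, col)
--     return None
--
-- def undo_in_grid(grid: list, col: int):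
--     for r in range(len(grid)):
--         if grid[r][col] != EMPTY:
--             grid[r][col] = EMPTY
--             return
--
-- def check_win_cells(board: list, last_row: int, last_col: int, token: str) -> list:
--     rows, cols = len(board), len(board[0])
--
--     for dr, dc in [(0, 1), (1, 0), (1, 1), (1, -1)]:
--         cells = [(last_row, last_col)]
--
--         r, c = last_row + dr, last_col + dc
--         while 0 <= r < rows and 0 <= c < cols and board[r][c] == token:
--             cells.append((r, c))
--             r += dr
--             c += dc
--
--         r, c = last_row - dr, last_col - dc
--         while 0 <= r < rows and 0 <= c < cols and board[r][c] == token: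
--             cells.insert(0, (r, c))
--             r -= dr
--             c -= dc
--
--         if len(cells) >= CONNECT_N:
--             return cells[:CONNECT_N]
--
--     return []
--
-- def _order_columns_center_first(cols: list, width: int) -> list:
--     center = width // 2
--     return sorted(cols, key=lambda c: (abs(c - center), c))
--
-- def _find_all_immediate_wins(board: list, player: str) -> list:
--     wins = []
--     cols = _order_columns_center_first(valid_columns(board), len(board[0]))
--     for col in cols:
--         pos = drop_in_grid(board, col, player)
--         if not pos:
--             continue
--         if check_win_cells(board, pos[0], pos[1], player):
--             wins.append(col)
--         undo_in_grid(board, col)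
--     return wins
-- ===== SOURCE B (Python) =====
-- EMPTY = "."
--
-- def _find_all_immediate_wins(board, player):
--     # Single pass sliding a length-4 window over rows, columns and both diagonals;
--     # a window with three `player` tokens and one EMPTY landing slot marks its column.
--     h = len(board)
--     w = len(board[0]) if board else 0
--
--     def at(r, c):
--         if 0 <= r < h and 0 <= c < len(board[r]):
--             return board[r][c]
--         return None
--
--     wins = set()
--     for r in range(h):
--         for c in range(w):
--             for dr, dc in ((0, 1), (1, 0), (1, 1), (1, -1)):
--                 vals = [at(r + k * dr, c + k * dc) for k in range(4)]
--                 if vals.count(player) == 3 and vals.count(EMPTY) == 1: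
--                     k = vals.index(EMPTY)
--                     er, ec = r + k * dr, c + k * dc
--                     if at(0, ec) == EMPTY and all(at(j, ec) != EMPTY for j in range(er + 1, h)):
--                         wins.add(ec)
--     center = w // 2
--     return sorted(wins, key=lambda col: (abs(col - center), col))
-- ===== Notes on version B (the rewrite author's own statement) =====
-- stated objective: alternative
-- what changed: Replaces A's per-column simulate-a-move search (mutate the board with drop_in_grid, grow runs from the landed cell in four directions, undo the mutation) by a single read-only pass that slides a length-4 window over every row, column and diagonal, marking a window's column when it holds three player tokens plus its playable landing slot, then sorts the marked set center-first with A's key.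
-- outside the precondition, e.g. on _find_all_immediate_wins([['.', '.', '.', '.']], '.'): A returns [2, 1, 3, 0], B returns []
import Mathlib
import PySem

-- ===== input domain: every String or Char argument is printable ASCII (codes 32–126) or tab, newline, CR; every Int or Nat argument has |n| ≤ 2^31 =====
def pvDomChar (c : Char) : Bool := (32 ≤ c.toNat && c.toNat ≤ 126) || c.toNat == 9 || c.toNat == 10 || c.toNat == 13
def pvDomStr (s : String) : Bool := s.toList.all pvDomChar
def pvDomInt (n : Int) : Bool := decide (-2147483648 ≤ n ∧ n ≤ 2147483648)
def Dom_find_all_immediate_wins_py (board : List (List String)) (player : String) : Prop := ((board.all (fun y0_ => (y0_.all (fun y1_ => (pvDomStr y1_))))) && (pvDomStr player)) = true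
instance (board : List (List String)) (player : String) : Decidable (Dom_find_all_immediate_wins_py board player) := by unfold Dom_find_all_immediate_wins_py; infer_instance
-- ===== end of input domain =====

-- B replaces A's per-column mutate/drop/check/undo search by one read-only sliding-window scan of the
-- board (objective: alternative, similar cost); A briefly mutates its argument in place (drop then undo,
-- a net no-op on Pre_ inputs) while B never writes — the equivalence proved is about the return value.

-- ===== PORT A =====
-- board[r][c]; every use below is bounds-guarded or in range under Pre_, so the total getD form is exact
def pvCell (b : List (List String)) (r c : Int) : String :=
  PySem.List.pyGetD (PySem.List.pyGetD b r []) c ""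

def valid_columns_port (board : List (List String)) : List Int :=
  if board = [] ∨ board.headD [] = [] then []
  else (PySem.List.pyRange 0 ((board.headD []).length : Int) 1).filter
        (fun c => PySem.List.pyGetD (board.headD []) c "" == ".")

def order_columns_center_first_port (cols : List Int) (width : Int) : List Int :=
  PySem.List.sorted2 cols (fun c => |c - PySem.Int.floordiv width 2|) (fun c => c) false

-- drop_in_grid's descending loop r = len-1 .. 0, as recursion on r+1
def dropGo (grid : List (List String)) (col : Int) (token : String) :
    Nat → (List (List String) × Option (Int × Int))
  | 0 => (grid, none)
  | n+1 =>
    if pvCell grid (n : Int) col == "." then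
      (PySem.List.pySetD grid (n : Int)
        (PySem.List.pySetD (PySem.List.pyGetD grid (n : Int) []) col token), some ((n : Int), col))
    else dropGo grid col token n

def drop_in_grid_port (grid : List (List String)) (col : Int) (token : String) :
    List (List String) × Option (Int × Int) :=
  dropGo grid col token grid.length

-- undo_in_grid's ascending loop; the visited index is grid.length - fuel
def undoGo (grid : List (List String)) (col : Int) : Nat → List (List String)
  | 0 => grid
  | f+1 =>
    let r : Int := ((grid.length - (f+1) : Nat) : Int)
    if !(pvCell grid r col == ".") then
      PySem.List.pySetD grid r (PySem.List.pySetD (PySem.List.pyGetD grid r []) col ".")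
    else undoGo grid col f

def undo_in_grid_port (grid : List (List String)) (col : Int) : List (List String) :=
  undoGo grid col grid.length

-- check_win_cells' two while loops; fuel rows+cols+1 strictly exceeds the loop's possible iteration
-- count (each step moves one coordinate monotonically inside the bounds), so the scan never truncates
def scanGo (b : List (List String)) (rows cols dr dc : Int) (tok : String) :
    Int → Int → Nat → List (Int × Int)
  | _, _, 0 => []
  | r, c, f+1 =>
    if 0 ≤ r ∧ r < rows ∧ 0 ≤ c ∧ c < cols ∧ pvCell b r c == tok then
      (r, c) :: scanGo b rows cols dr dc tok (r + dr) (c + dc) f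
    else []

def checkDir (b : List (List String)) (rows cols lr lc : Int) (tok : String) (dr dc : Int) :
    List (Int × Int) :=
  let fuel := rows.toNat + cols.toNat + 1
  let fwd := scanGo b rows cols dr dc tok (lr + dr) (lc + dc) fuel
  let bwd := scanGo b rows cols (-dr) (-dc) tok (lr - dr) (lc - dc) fuel
  bwd.reverse ++ (lr, lc) :: fwd

def checkLoop (b : List (List String)) (rows cols lr lc : Int) (tok : String) :
    List (Int × Int) → List (Int × Int)
  | [] => []
  | d :: ds =>
    let cells := checkDir b rows cols lr lc tok d.1 d.2
    if 4 ≤ cells.length then cells.take 4 else checkLoop b rows cols lr lc tok ds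

def check_win_cells_port (board : List (List String)) (lr lc : Int) (tok : String) :
    List (Int × Int) :=
  checkLoop board (board.length : Int) ((board.headD []).length : Int) lr lc tok
    [(0,1),(1,0),(1,1),(1,-1)]

def find_all_immediate_wins_py (board : List (List String)) (player : String) : List Int :=
  let cols := order_columns_center_first_port (valid_columns_port board)
                ((board.headD []).length : Int)
  (cols.foldl (fun (st : List (List String) × List Int) col =>
    match drop_in_grid_port st.1 col player with
    | (g, none) => (g, st.2)
    | (g, some pos) =>
      let wins := if check_win_cells_port g pos.1 pos.2 player ≠ [] then st.2 ++ [col] else st.2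
      (undo_in_grid_port g col, wins)) (board, [])).2

-- ===== PORT B =====
-- Source B's bounds-checked accessor at(r, c) (None out of range)
def pvAt (board : List (List String)) (r c : Int) : Option String :=
  if 0 ≤ r ∧ r < (board.length : Int) ∧ 0 ≤ c ∧ c < ((PySem.List.pyGetD board r []).length : Int) then
    some (PySem.List.pyGetD (PySem.List.pyGetD board r []) c "")
  else none

def find_all_immediate_wins_py_alt (board : List (List String)) (player : String) : List Int :=
  let h : Int := (board.length : Int)
  let w : Int := if board = [] then 0 else ((board.headD []).length : Int)
  let wins : PySem.Set Int :=
    (PySem.List.pyRange 0 h 1).foldl (fun s1 r =>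
      (PySem.List.pyRange 0 w 1).foldl (fun s2 c =>
        ([((0:Int),(1:Int)), (1,0), (1,1), (1,-1)]).foldl (fun (s3 : PySem.Set Int) d =>
          let vals := (PySem.List.pyRange 0 4 1).map (fun k => pvAt board (r + k * d.1) (c + k * d.2))
          if vals.count (some player) = 3 ∧ vals.count (some ".") = 1 then
            match PySem.List.index? vals (some ".") with
            | some k =>
              let er := r + (k : Int) * d.1
              let ec := c + (k : Int) * d.2
              if (pvAt board 0 ec == some ".") &&
                 (PySem.List.pyRange (er+1) h 1).all (fun j => !(pvAt board j ec == some ".")) then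
                PySem.Set.add s3 ec
              else s3
            | none => s3
          else s3) s2) s1) PySem.Set.empty
  PySem.List.sorted2 wins (fun col => |col - PySem.Int.floordiv w 2|) (fun col => col) false

-- ===== PRECONDITION & SPEC =====
-- Pre_ excludes the empty board (A raises IndexError on len(board[0])) and, whenever some column is
-- playable (a '.' in the top row), boards that are ragged (A indexes short rows: IndexError), boards
-- with a token above a '.' in a PLAYABLE column (A's undo then clears a cell its drop never filled,
-- observably mutating the argument and corrupting later columns), and the degenerate player == '.'
-- (A then 'wins' by runs of blanks and its undo again clears an unrelated token). Boards with no
-- playable column are all admitted, however ragged.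
def Pre_find_all_immediate_wins_py (board : List (List String)) (player : String) : Prop :=
  board ≠ [] ∧
  ((∃ c < (board.headD []).length, (board.headD []).getD c "" = ".") →
    player ≠ "." ∧
    (∀ row ∈ board, row.length = (board.headD []).length) ∧
    (∀ c < (board.headD []).length, ∀ r2 < board.length, ∀ r1 < r2,
       ((board.headD []).getD c "" = "." ∧ (board.getD r1 []).getD c "" ≠ ".") →
       (board.getD r2 []).getD c "" ≠ "."))

instance (board : List (List String)) (player : String) :
    Decidable (Pre_find_all_immediate_wins_py board player) := by
  unfold Pre_find_all_immediate_wins_py; infer_instance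

def pvWitness_find_all_immediate_wins_py : List (List String) × String :=
  ([[".", ".", ".", "."], ["X", "X", "X", "."]], "X")

def Spec_find_all_immediate_wins_py (board : List (List String)) (player : String) (out : List Int) : Prop := out = find_all_immediate_wins_py_alt board player
instance (board : List (List String)) (player : String) (out : List Int) : Decidable (Spec_find_all_immediate_wins_py board player out) := by unfold Spec_find_all_immediate_wins_py; infer_instance

-- ===== CLAIM (what is proved, stated in full; the proofs are below) =====
def Claim_equal_find_all_immediate_wins_py : Prop := ∀ (board : List (List String)) (player : String), Dom_find_all_immediate_wins_py board player → Pre_find_all_immediate_wins_py board player → Spec_find_all_immediate_wins_py board player (find_all_immediate_wins_py board player)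

-- ===== LEMMAS AND PROOFS =====

-- ---------- proof-side abbreviations ----------
def pvDirsL : List (Int × Int) := [(0,1),(1,0),(1,1),(1,-1)]

-- spec-level cell access (Nat coordinates)
def cB (board : List (List String)) (r c : Nat) : String := (board.getD r []).getD c ""

-- landing row of column c: greatest empty row (the well-defined drop target under Pre_)
def landN (board : List (List String)) (c : Nat) : Nat :=
  Nat.findGreatest (fun r => cB board r c = ".") (board.length - 1)

def placeG (board : List (List String)) (player : String) (c : Nat) : List (List String) :=
  board.set (landN board c) ((board.getD (landN board c) []).set c player)

-- the guard of scanGo, as a predicate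
def goodP (g : List (List String)) (rows cols : Int) (tok : String) (r c : Int) : Prop :=
  0 ≤ r ∧ r < rows ∧ 0 ≤ c ∧ c < cols ∧ pvCell g r c == tok

-- window around (lr,lc) in direction d: some offset k ≤ 3 such that the other three window
-- cells all hold tok (the guard of scanGo)
def winW (g : List (List String)) (rows cols lr lc : Int) (tok : String) (dr dc : Int) : Prop :=
  ∃ k : Nat, k ≤ 3 ∧ ∀ j : Nat, j ≤ 3 → j ≠ k →
    goodP g rows cols tok (lr + ((j : Int) - (k : Int)) * dr) (lc + ((j : Int) - (k : Int)) * dc)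

-- B's inner body condition: window starting at (r,c) in direction d marks column x
def addP (board : List (List String)) (player : String) (r c : Int) (d : Int × Int) (x : Int) : Prop :=
  let vals := (PySem.List.pyRange 0 4 1).map (fun k => pvAt board (r + k * d.1) (c + k * d.2))
  vals.count (some player) = 3 ∧ vals.count (some ".") = 1 ∧
  ∃ k : Nat, PySem.List.index? vals (some ".") = some k ∧
    ((pvAt board 0 (c + (k : Int) * d.2) == some ".") &&
     (PySem.List.pyRange (r + (k : Int) * d.1 + 1) (board.length : Int) 1).all
       (fun j => !(pvAt board j (c + (k : Int) * d.2) == some "."))) = true ∧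
    x = c + (k : Int) * d.2

-- B's accumulated set, and A's column order, named so the ports unfold to them
def bSet (board : List (List String)) (player : String) : PySem.Set Int :=
  (PySem.List.pyRange 0 (board.length : Int) 1).foldl (fun s1 r =>
    (PySem.List.pyRange 0 (if board = [] then 0 else ((board.headD []).length : Int)) 1).foldl (fun s2 c =>
      pvDirsL.foldl (fun (s3 : PySem.Set Int) d =>
        let vals := (PySem.List.pyRange 0 4 1).map (fun k => pvAt board (r + k * d.1) (c + k * d.2))
        if vals.count (some player) = 3 ∧ vals.count (some ".") = 1 then
          match PySem.List.index? vals (some ".") with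
          | some k =>
            let er := r + (k : Int) * d.1
            let ec := c + (k : Int) * d.2
            if (pvAt board 0 ec == some ".") &&
               (PySem.List.pyRange (er+1) (board.length : Int) 1).all
                 (fun j => !(pvAt board j ec == some ".")) then
              PySem.Set.add s3 ec
            else s3
          | none => s3
        else s3) s2) s1) PySem.Set.empty

lemma alt_eq_bSet (board : List (List String)) (player : String) :
    find_all_immediate_wins_py_alt board player =
      PySem.List.sorted2 (bSet board player)
        (fun col => |col - PySem.Int.floordiv (if board = [] then 0 else ((board.headD []).length : Int)) 2|)
        (fun col => col) false := rfl

-- ---------- basic bridges ----------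
lemma pvCell_cast (b : List (List String)) (r c : Nat) :
    pvCell b (r : Int) (c : Int) = cB b r c := by
  simp [pvCell, cB, PySem.List.pyGetD_of_nonneg]

-- ---------- A side: drop and undo ----------
lemma dropGo_spec (board : List (List String)) (player : String) (c m : Nat)
    (hmc : cB board m c = ".")
    (hup : ∀ r, m < r → r < board.length → cB board r c ≠ ".") :
    ∀ f, m < f → f ≤ board.length →
      dropGo board (c : Int) player f =
        (board.set m ((board.getD m []).set c player), some ((m : Int), (c : Int))) := by
  intro f
  induction f with
  | zero => omega
  | succ n ih =>
    intro hmf hfl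
    by_cases hnm : n = m
    · subst hnm
      simp [dropGo, pvCell_cast, hmc, PySem.List.pySetD_natCast]
    · have hmn : m < n := by omega
      have hne : cB board n c ≠ "." := hup n hmn (by omega)
      simp only [dropGo, pvCell_cast]
      rw [if_neg (by simpa using hne)]
      exact ih hmn (by omega)

lemma drop_spec (board : List (List String)) (player : String) (c m : Nat)
    (hm : m < board.length) (hmc : cB board m c = ".")
    (hup : ∀ r, m < r → r < board.length → cB board r c ≠ ".") :
    drop_in_grid_port board (c : Int) player =
      (board.set m ((board.getD m []).set c player), some ((m : Int), (c : Int))) := by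
  exact dropGo_spec board player c m hmc hup board.length hm le_rfl

lemma undo_spec (board : List (List String)) (player : String) (c m : Nat)
    (hplayer : player ≠ ".") (hm : m < board.length)
    (hmc : cB board m c = ".") (hcw : c < (board.getD m []).length)
    (hdown : ∀ r, r < m → cB board r c = ".") :
    undo_in_grid_port (board.set m ((board.getD m []).set c player)) (c : Int) = board := by
  set g := board.set m ((board.getD m []).set c player) with hg
  have hlen : g.length = board.length := by simp [hg]
  have hrowm : g.getD m [] = (board.getD m []).set c player := by
    simp [hg, List.getD_eq_getElem?_getD, hm]
  have hboardm : board.getD m [] = board[m] := by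
    simp [List.getD_eq_getElem?_getD, List.getElem?_eq_getElem hm]
  have key : ∀ f, f ≤ board.length → board.length - f ≤ m → undoGo g (c : Int) f = board := by
    intro f
    induction f with
    | zero => omega
    | succ f ih =>
      intro hfl hinv
      by_cases hRm : board.length - (f+1) = m
      · -- the placed token is cleared back to '.' and the grid is restored
        have hcell : pvCell g ((g.length - (f+1) : Nat) : Int) (c : Int) = player := by
          rw [hlen, hRm, pvCell_cast]
          unfold cB
          rw [hrowm]
          have hcl : c < ((board.getD m []).set c player).length := by simpa using hcw
          rw [List.getD_eq_getElem?_getD, List.getElem?_eq_getElem hcl, Option.getD_some,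
            List.getElem_set_self]
        simp only [undoGo, hcell]
        rw [if_pos (by simpa using hplayer)]
        have hrow : ((board.getD m []).set c player).set c "." = board.getD m [] := by
          rw [List.set_set]
          have : (board.getD m [])[c] = "." := by
            have := hmc
            unfold cB at this
            rwa [List.getD_eq_getElem?_getD, List.getElem?_eq_getElem hcw, Option.getD_some] at this
          conv_rhs => rw [← List.set_getElem_self (as := board.getD m []) hcw]
          rw [this]
        rw [hlen, hRm]
        rw [PySem.List.pyGetD_natCast, PySem.List.pySetD_natCast, PySem.List.pySetD_natCast]
        rw [hrowm, hrow, hg, List.set_set]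
        rw [hboardm]
        exact List.set_getElem_self hm
      · have hRlt : board.length - (f+1) < m := by omega
        have hcell : pvCell g ((g.length - (f+1) : Nat) : Int) (c : Int) = "." := by
          rw [hlen, pvCell_cast]
          unfold cB
          have : g.getD (board.length - (f+1)) [] = board.getD (board.length - (f+1)) [] := by
            simp [hg, List.getD_eq_getElem?_getD, List.getElem?_set_ne (by omega : m ≠ board.length - (f+1))]
          rw [this]
          exact hdown _ hRlt
        simp only [undoGo, hcell]
        rw [if_neg (by simp)]
        exact ih (by omega) (by omega)
  have := key board.length le_rfl (by omega)
  unfold undo_in_grid_port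
  rwa [hlen]

-- ---------- scan characterization ----------
lemma scan_sound (b : List (List String)) (rows cols dr dc : Int) (tok : String) :
    ∀ f (r c : Int) (j : Nat), j < (scanGo b rows cols dr dc tok r c f).length →
      goodP b rows cols tok (r + (j : Int) * dr) (c + (j : Int) * dc) := by
  intro f
  induction f with
  | zero => intro r c j h; simp [scanGo] at h
  | succ f ih =>
    intro r c j h
    rw [scanGo] at h
    split at h
    case isTrue hgd =>
      cases j with
      | zero => unfold goodP; simpa using hgd
      | succ j =>
        have hj := ih (r + dr) (c + dc) j (by simpa using h)
        have e1 : r + dr + (j : Int) * dr = r + ((j + 1 : Nat) : Int) * dr := by push_cast; ring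
        have e2 : c + dc + (j : Int) * dc = c + ((j + 1 : Nat) : Int) * dc := by push_cast; ring
        rwa [e1, e2] at hj
    case isFalse hgd => simp at h

lemma scan_complete (b : List (List String)) (rows cols dr dc : Int) (tok : String) :
    ∀ (n : Nat) f (r c : Int), n ≤ f →
      (∀ j : Nat, j < n → goodP b rows cols tok (r + (j : Int) * dr) (c + (j : Int) * dc)) →
      n ≤ (scanGo b rows cols dr dc tok r c f).length := by
  intro n
  induction n with
  | zero => intro f r c _ _; omega
  | succ n ih =>
    intro f r c hnf hgood
    obtain ⟨f, rfl⟩ : ∃ f', f = f' + 1 := ⟨f - 1, by omega⟩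
    rw [scanGo]
    have h0 := hgood 0 (by omega)
    unfold goodP at h0
    simp only [Nat.cast_zero, zero_mul, add_zero] at h0
    rw [if_pos h0]
    have := ih f (r + dr) (c + dc) (by omega) (by
      intro j hj
      have hj1 := hgood (j + 1) (by omega)
      have e1 : r + ((j + 1 : Nat) : Int) * dr = r + dr + (j : Int) * dr := by push_cast; ring
      have e2 : c + ((j + 1 : Nat) : Int) * dc = c + dc + (j : Int) * dc := by push_cast; ring
      rwa [e1, e2] at hj1)
    simpa using this

lemma checkDir_iff (g : List (List String)) (rows cols lr lc : Int) (tok : String) (dr dc : Int)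
    (hfuel : 3 ≤ rows.toNat + cols.toNat + 1) :
    4 ≤ (checkDir g rows cols lr lc tok dr dc).length ↔ winW g rows cols lr lc tok dr dc := by
  unfold checkDir
  set F := rows.toNat + cols.toNat + 1 with hF
  set fwd := scanGo g rows cols dr dc tok (lr + dr) (lc + dc) F with hfwd
  set bwd := scanGo g rows cols (-dr) (-dc) tok (lr - dr) (lc - dc) F with hbwd
  have hlen : (bwd.reverse ++ (lr, lc) :: fwd).length = bwd.length + 1 + fwd.length := by
    simp; omega
  rw [hlen]
  constructor
  · intro h
    refine ⟨min bwd.length 3, by omega, ?_⟩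
    intro j hj hjk
    rcases lt_or_gt_of_ne hjk with hlt | hgt
    · have ht : min bwd.length 3 - 1 - j < bwd.length := by omega
      have hs := scan_sound g rows cols (-dr) (-dc) tok F (lr - dr) (lc - dc) _ ht
      have e1 : lr - dr + ((min bwd.length 3 - 1 - j : Nat) : Int) * (-dr)
          = lr + ((j : Int) - ((min bwd.length 3 : Nat) : Int)) * dr := by
        have : ((min bwd.length 3 - 1 - j : Nat) : Int)
            = ((min bwd.length 3 : Nat) : Int) - 1 - (j : Int) := by omega
        rw [this]; ring
      have e2 : lc - dc + ((min bwd.length 3 - 1 - j : Nat) : Int) * (-dc)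
          = lc + ((j : Int) - ((min bwd.length 3 : Nat) : Int)) * dc := by
        have : ((min bwd.length 3 - 1 - j : Nat) : Int)
            = ((min bwd.length 3 : Nat) : Int) - 1 - (j : Int) := by omega
        rw [this]; ring
      rwa [e1, e2] at hs
    · have ht : j - min bwd.length 3 - 1 < fwd.length := by omega
      have hs := scan_sound g rows cols dr dc tok F (lr + dr) (lc + dc) _ ht
      have e1 : lr + dr + ((j - min bwd.length 3 - 1 : Nat) : Int) * dr
          = lr + ((j : Int) - ((min bwd.length 3 : Nat) : Int)) * dr := by
        have : ((j - min bwd.length 3 - 1 : Nat) : Int)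
            = (j : Int) - ((min bwd.length 3 : Nat) : Int) - 1 := by omega
        rw [this]; ring
      have e2 : lc + dc + ((j - min bwd.length 3 - 1 : Nat) : Int) * dc
          = lc + ((j : Int) - ((min bwd.length 3 : Nat) : Int)) * dc := by
        have : ((j - min bwd.length 3 - 1 : Nat) : Int)
            = (j : Int) - ((min bwd.length 3 : Nat) : Int) - 1 := by omega
        rw [this]; ring
      rwa [e1, e2] at hs
  · rintro ⟨k, hk, hw⟩
    have ha : 3 - k ≤ fwd.length := by
      refine scan_complete g rows cols dr dc tok (3 - k) F (lr + dr) (lc + dc) (by omega) ?_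
      intro j hj
      have hj1 := hw (k + 1 + j) (by omega) (by omega)
      have e1 : lr + (((k + 1 + j : Nat) : Int) - (k : Int)) * dr
          = lr + dr + (j : Int) * dr := by push_cast; ring
      have e2 : lc + (((k + 1 + j : Nat) : Int) - (k : Int)) * dc
          = lc + dc + (j : Int) * dc := by push_cast; ring
      rwa [e1, e2] at hj1
    have hb : k ≤ bwd.length := by
      refine scan_complete g rows cols (-dr) (-dc) tok k F (lr - dr) (lc - dc) (by omega) ?_
      intro j hj
      have hj1 := hw (k - 1 - j) (by omega) (by omega)
      have e1 : lr + (((k - 1 - j : Nat) : Int) - (k : Int)) * dr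
          = lr - dr + (j : Int) * (-dr) := by
        have : ((k - 1 - j : Nat) : Int) = (k : Int) - 1 - (j : Int) := by omega
        rw [this]; ring
      have e2 : lc + (((k - 1 - j : Nat) : Int) - (k : Int)) * dc
          = lc - dc + (j : Int) * (-dc) := by
        have : ((k - 1 - j : Nat) : Int) = (k : Int) - 1 - (j : Int) := by omega
        rw [this]; ring
      rwa [e1, e2] at hj1
    omega

lemma checkLoop_ne_nil_iff (g : List (List String)) (rows cols lr lc : Int) (tok : String) :
    ∀ ds, checkLoop g rows cols lr lc tok ds ≠ [] ↔
      ∃ d ∈ ds, 4 ≤ (checkDir g rows cols lr lc tok d.1 d.2).length := by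
  intro ds
  induction ds with
  | nil => simp [checkLoop]
  | cons d ds ih =>
    simp only [checkLoop]
    by_cases hd : 4 ≤ (checkDir g rows cols lr lc tok d.1 d.2).length
    · rw [if_pos hd]
      have hne : (checkDir g rows cols lr lc tok d.1 d.2).take 4 ≠ [] := by
        have : ((checkDir g rows cols lr lc tok d.1 d.2).take 4).length = 4 := by
          rw [List.length_take]; omega
        intro hnil; rw [hnil] at this; simp at this
      simp only [hne, ne_eq, not_false_eq_true, true_iff]
      exact ⟨d, by simp, hd⟩
    · rw [if_neg hd, ih]
      constructor
      · rintro ⟨d', hd', h4⟩; exact ⟨d', by simp [hd'], h4⟩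
      · rintro ⟨d', hd', h4⟩
        rcases List.mem_cons.mp hd' with rfl | hmem
        · exact absurd h4 hd
        · exact ⟨d', hmem, h4⟩

-- ---------- generic fold-over-set lemmas ----------
lemma mem_foldl_step {β : Type} (l : List β) (step : PySem.Set Int → β → PySem.Set Int)
    (Q : β → Int → Prop) (hstep : ∀ s y x, x ∈ step s y ↔ x ∈ s ∨ Q y x) :
    ∀ s x, (x ∈ l.foldl step s ↔ x ∈ s ∨ ∃ y ∈ l, Q y x) := by
  induction l with
  | nil => simp
  | cons y l ih =>
    intro s x
    rw [List.foldl_cons, ih, hstep]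
    constructor
    · rintro ((h | h) | ⟨z, hz, hq⟩)
      · exact Or.inl h
      · exact Or.inr ⟨y, by simp, h⟩
      · exact Or.inr ⟨z, by simp [hz], hq⟩
    · rintro (h | ⟨z, hz, hq⟩)
      · exact Or.inl (Or.inl h)
      · rcases List.mem_cons.mp hz with rfl | hz
        · exact Or.inl (Or.inr hq)
        · exact Or.inr ⟨z, hz, hq⟩

lemma nodup_foldl_step {β : Type} (l : List β) (step : PySem.Set Int → β → PySem.Set Int)
    (hstep : ∀ s y, s.Nodup → (step s y).Nodup) :
    ∀ s : PySem.Set Int, s.Nodup → (l.foldl step s).Nodup := by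
  induction l with
  | nil => intro s hs; simpa using hs
  | cons y l ih => intro s hs; exact ih _ (hstep s y hs)

-- named copies of bSet's three loop bodies (rfl-equal to the lambdas in bSet)
def bStep3 (board : List (List String)) (player : String) (r c : Int) :
    PySem.Set Int → Int × Int → PySem.Set Int := fun s3 d =>
  let vals := (PySem.List.pyRange 0 4 1).map (fun k => pvAt board (r + k * d.1) (c + k * d.2))
  if vals.count (some player) = 3 ∧ vals.count (some ".") = 1 then
    match PySem.List.index? vals (some ".") with
    | some k =>
      let er := r + (k : Int) * d.1
      let ec := c + (k : Int) * d.2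
      if (pvAt board 0 ec == some ".") &&
         (PySem.List.pyRange (er+1) (board.length : Int) 1).all
           (fun j => !(pvAt board j ec == some ".")) then
        PySem.Set.add s3 ec
      else s3
    | none => s3
  else s3

def bStep2 (board : List (List String)) (player : String) (r : Int) :
    PySem.Set Int → Int → PySem.Set Int := fun s2 c =>
  pvDirsL.foldl (bStep3 board player r c) s2

def bStep1 (board : List (List String)) (player : String) :
    PySem.Set Int → Int → PySem.Set Int := fun s1 r =>
  (PySem.List.pyRange 0 (if board = [] then 0 else ((board.headD []).length : Int)) 1).foldl
    (bStep2 board player r) s1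

lemma bSet_eq (board : List (List String)) (player : String) :
    bSet board player =
      (PySem.List.pyRange 0 (board.length : Int) 1).foldl (bStep1 board player) PySem.Set.empty := rfl

lemma mem_bStep3 (board : List (List String)) (player : String) (r c : Int)
    (s : PySem.Set Int) (d : Int × Int) (x : Int) :
    x ∈ bStep3 board player r c s d ↔ x ∈ s ∨ addP board player r c d x := by
  unfold bStep3 addP
  by_cases h1 : ((PySem.List.pyRange 0 4 1).map (fun k => pvAt board (r + k * d.1) (c + k * d.2))).count (some player) = 3 ∧
      ((PySem.List.pyRange 0 4 1).map (fun k => pvAt board (r + k * d.1) (c + k * d.2))).count (some ".") = 1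
  · rw [if_pos h1]
    cases hidx : PySem.List.index? ((PySem.List.pyRange 0 4 1).map (fun k => pvAt board (r + k * d.1) (c + k * d.2))) (some ".") with
    | none =>
      constructor
      · exact Or.inl
      · rintro (hs | ⟨_, _, k', hk', _⟩)
        · exact hs
        · rw [hidx] at hk'; cases hk'
    | some k =>
      dsimp only
      by_cases hg : ((pvAt board 0 (c + (k : Int) * d.2) == some ".") &&
          (PySem.List.pyRange (r + (k : Int) * d.1 + 1) (board.length : Int) 1).all
            (fun j => !(pvAt board j (c + (k : Int) * d.2) == some "."))) = true
      · rw [if_pos hg, PySem.Set.mem_add]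
        constructor
        · rintro (hs | rfl)
          · exact Or.inl hs
          · exact Or.inr ⟨h1.1, h1.2, k, hidx, hg, rfl⟩
        · rintro (hs | ⟨_, _, k', hk', hg', rfl⟩)
          · exact Or.inl hs
          · rw [hidx] at hk'; cases hk'; exact Or.inr rfl
      · rw [if_neg hg]
        constructor
        · exact Or.inl
        · rintro (hs | ⟨_, _, k', hk', hg', rfl⟩)
          · exact hs
          · rw [hidx] at hk'; cases hk'; exact absurd hg' hg
  · rw [if_neg h1]
    constructor
    · exact Or.inl
    · rintro (hs | ⟨h3, hc1, _⟩)
      · exact hs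
      · exact absurd ⟨h3, hc1⟩ h1

lemma mem_bSet (board : List (List String)) (player : String) (x : Int) :
    x ∈ bSet board player ↔
      ∃ r ∈ PySem.List.pyRange 0 (board.length : Int) 1,
      ∃ c ∈ PySem.List.pyRange 0 (if board = [] then 0 else ((board.headD []).length : Int)) 1,
      ∃ d ∈ pvDirsL, addP board player r c d x := by
  rw [bSet_eq]
  rw [mem_foldl_step _ _ (fun r x =>
      ∃ c ∈ PySem.List.pyRange 0 (if board = [] then 0 else ((board.headD []).length : Int)) 1,
      ∃ d ∈ pvDirsL, addP board player r c d x)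
    (fun s1 r x => by
      unfold bStep1
      rw [mem_foldl_step _ _ (fun c x => ∃ d ∈ pvDirsL, addP board player r c d x)
        (fun s2 c x => by
          unfold bStep2
          rw [mem_foldl_step _ _ (fun d x => addP board player r c d x)
            (mem_bStep3 board player r c) s2 x])])]
  simp [PySem.Set.empty]

lemma nodup_bStep3 (board : List (List String)) (player : String) (r c : Int)
    (s : PySem.Set Int) (d : Int × Int) (hs : s.Nodup) : (bStep3 board player r c s d).Nodup := by
  unfold bStep3
  dsimp only
  split
  · split
    · split
      · exact PySem.Set.nodup_add _ _ hs
      · exact hs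
    · exact hs
  · exact hs

lemma nodup_bSet (board : List (List String)) (player : String) : (bSet board player).Nodup := by
  rw [bSet_eq]
  refine nodup_foldl_step _ _ (fun s1 r hs1 => ?_) _ (by simp [PySem.Set.empty])
  unfold bStep1
  refine nodup_foldl_step _ _ (fun s2 c hs2 => ?_) _ hs1
  unfold bStep2
  exact nodup_foldl_step _ _ (fun s3 d hs3 => nodup_bStep3 board player r c s3 d hs3) _ hs2

-- ---------- the four-cell window list ----------
lemma quad_facts {α : Type} [BEq α] [LawfulBEq α] (v0 v1 v2 v3 x y : α) (hxy : x ≠ y)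
    (h3 : ([v0, v1, v2, v3] : List α).count x = 3) (h1 : ([v0, v1, v2, v3] : List α).count y = 1) :
    ∃ k : Nat, k ≤ 3 ∧ PySem.List.index? [v0, v1, v2, v3] y = some k ∧
      (∀ j : Nat, j ≤ 3 → j ≠ k → [v0, v1, v2, v3].getD j x = x) ∧
      [v0, v1, v2, v3].getD k x = y := by
  have hy : (v0 = y ∧ v1 ≠ y ∧ v2 ≠ y ∧ v3 ≠ y) ∨ (v0 ≠ y ∧ v1 = y ∧ v2 ≠ y ∧ v3 ≠ y) ∨
      (v0 ≠ y ∧ v1 ≠ y ∧ v2 = y ∧ v3 ≠ y) ∨ (v0 ≠ y ∧ v1 ≠ y ∧ v2 ≠ y ∧ v3 = y) := by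
    by_cases a0 : v0 = y <;> by_cases a1 : v1 = y <;> by_cases a2 : v2 = y <;>
      by_cases a3 : v3 = y <;> simp_all [List.count_cons]
  rcases hy with ⟨e0, n1, n2, n3⟩ | ⟨n0, e1, n2, n3⟩ | ⟨n0, n1, e2, n3⟩ | ⟨n0, n1, n2, e3⟩
  · -- y at position 0
    have b1 : v1 = x := by
      by_cases hb : v1 = x
      · exact hb
      · exfalso
        simp only [List.count_cons, List.count_nil, beq_iff_eq] at h3
        split_ifs at h3 <;> first | omega | simp_all
    have b2 : v2 = x := by
      by_cases hb : v2 = x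
      · exact hb
      · exfalso
        simp only [List.count_cons, List.count_nil, beq_iff_eq] at h3
        split_ifs at h3 <;> first | omega | simp_all
    have b3 : v3 = x := by
      by_cases hb : v3 = x
      · exact hb
      · exfalso
        simp only [List.count_cons, List.count_nil, beq_iff_eq] at h3
        split_ifs at h3 <;> first | omega | simp_all
    refine ⟨0, by omega, ?_, ?_, ?_⟩
    · rw [e0, PySem.List.index?_cons_self]
    · intro j hj hjk
      interval_cases j <;> first | (exact absurd rfl hjk) | simp [b1, b2, b3, e0]
    · simp [b1, b2, b3, e0]
  · -- y at position 1
    have b0 : v0 = x := by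
      by_cases hb : v0 = x
      · exact hb
      · exfalso
        simp only [List.count_cons, List.count_nil, beq_iff_eq] at h3
        split_ifs at h3 <;> first | omega | simp_all
    have b2 : v2 = x := by
      by_cases hb : v2 = x
      · exact hb
      · exfalso
        simp only [List.count_cons, List.count_nil, beq_iff_eq] at h3
        split_ifs at h3 <;> first | omega | simp_all
    have b3 : v3 = x := by
      by_cases hb : v3 = x
      · exact hb
      · exfalso
        simp only [List.count_cons, List.count_nil, beq_iff_eq] at h3
        split_ifs at h3 <;> first | omega | simp_all
    refine ⟨1, by omega, ?_, ?_, ?_⟩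
    · rw [PySem.List.index?_cons_of_ne _ n0, e1, PySem.List.index?_cons_self]; rfl
    · intro j hj hjk
      interval_cases j <;> first | (exact absurd rfl hjk) | simp [b0, b2, b3, e1]
    · simp [b0, b2, b3, e1]
  · -- y at position 2
    have b0 : v0 = x := by
      by_cases hb : v0 = x
      · exact hb
      · exfalso
        simp only [List.count_cons, List.count_nil, beq_iff_eq] at h3
        split_ifs at h3 <;> first | omega | simp_all
    have b1 : v1 = x := by
      by_cases hb : v1 = x
      · exact hb
      · exfalso
        simp only [List.count_cons, List.count_nil, beq_iff_eq] at h3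
        split_ifs at h3 <;> first | omega | simp_all
    have b3 : v3 = x := by
      by_cases hb : v3 = x
      · exact hb
      · exfalso
        simp only [List.count_cons, List.count_nil, beq_iff_eq] at h3
        split_ifs at h3 <;> first | omega | simp_all
    refine ⟨2, by omega, ?_, ?_, ?_⟩
    · rw [PySem.List.index?_cons_of_ne _ n0, PySem.List.index?_cons_of_ne _ n1, e2, PySem.List.index?_cons_self]; rfl
    · intro j hj hjk
      interval_cases j <;> first | (exact absurd rfl hjk) | simp [b0, b1, b3, e2]
    · simp [b0, b1, b3, e2]
  · -- y at position 3
    have b0 : v0 = x := by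
      by_cases hb : v0 = x
      · exact hb
      · exfalso
        simp only [List.count_cons, List.count_nil, beq_iff_eq] at h3
        split_ifs at h3 <;> first | omega | simp_all
    have b1 : v1 = x := by
      by_cases hb : v1 = x
      · exact hb
      · exfalso
        simp only [List.count_cons, List.count_nil, beq_iff_eq] at h3
        split_ifs at h3 <;> first | omega | simp_all
    have b2 : v2 = x := by
      by_cases hb : v2 = x
      · exact hb
      · exfalso
        simp only [List.count_cons, List.count_nil, beq_iff_eq] at h3
        split_ifs at h3 <;> first | omega | simp_all
    refine ⟨3, by omega, ?_, ?_, ?_⟩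
    · rw [PySem.List.index?_cons_of_ne _ n0, PySem.List.index?_cons_of_ne _ n1, PySem.List.index?_cons_of_ne _ n2, e3, PySem.List.index?_cons_self]; rfl
    · intro j hj hjk
      interval_cases j <;> first | (exact absurd rfl hjk) | simp [b0, b1, b2, e3]
    · simp [b0, b1, b2, e3]

lemma getD_quad {α : Type} (f : Nat → α) (d : α) :
    ∀ j : Nat, j ≤ 3 → ([f 0, f 1, f 2, f 3] : List α).getD j d = f j := by
  intro j hj; interval_cases j <;> rfl

-- ---------- landing rows and the A-side fold ----------
abbrev winPred (board : List (List String)) (player : String) (col : Int) : Prop :=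
  check_win_cells_port (placeG board player col.toNat)
    ((landN board col.toNat : Nat) : Int) col player ≠ []

lemma getD_zero_headD (b : List (List String)) (hb : b ≠ []) : b.getD 0 [] = b.headD [] := by
  cases b with
  | nil => exact absurd rfl hb
  | cons hd tl => rfl

lemma rowlen_rect (board : List (List String))
    (rect : ∀ row ∈ board, row.length = (board.headD []).length) :
    ∀ r, r < board.length → (board.getD r []).length = (board.headD []).length := by
  intro r hr
  rw [List.getD_eq_getElem?_getD, List.getElem?_eq_getElem hr, Option.getD_some]
  exact rect _ (List.getElem_mem hr)

lemma land_spec (board : List (List String)) (c : Nat)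
    (hb : board ≠ []) (hcw : c < (board.headD []).length) (h0 : cB board 0 c = ".")
    (grav : ∀ c' < (board.headD []).length, cB board 0 c' = "." →
        ∀ r2 < board.length, ∀ r1 < r2,
        cB board r1 c' ≠ "." → cB board r2 c' ≠ ".") :
    landN board c < board.length ∧ cB board (landN board c) c = "." ∧
    (∀ r, landN board c < r → r < board.length → cB board r c ≠ ".") ∧
    (∀ r, r < landN board c → cB board r c = ".") := by
  have hH : 0 < board.length := List.length_pos_iff.mpr hb
  have hspec : cB board (landN board c) c = "." :=
    Nat.findGreatest_spec (P := fun r => cB board r c = ".") (Nat.zero_le _) h0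
  have hle : landN board c ≤ board.length - 1 := Nat.findGreatest_le _
  have hlt : landN board c < board.length := by omega
  refine ⟨hlt, hspec, ?_, ?_⟩
  · intro r hmr hrH
    exact Nat.findGreatest_is_greatest hmr (by omega)
  · intro r hrm
    by_contra hne
    exact grav c hcw h0 (landN board c) hlt r hrm hne hspec

lemma land_unique (board : List (List String)) (c m' : Nat)
    (hb : board ≠ []) (hcw : c < (board.headD []).length) (h0 : cB board 0 c = ".")
    (hm' : m' < board.length) (h1 : cB board m' c = ".")
    (h2 : ∀ r, m' < r → r < board.length → cB board r c ≠ ".") :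
    m' = landN board c := by
  have hspec : cB board (landN board c) c = "." :=
    Nat.findGreatest_spec (P := fun r => cB board r c = ".") (Nat.zero_le _) h0
  have hle : landN board c ≤ board.length - 1 := Nat.findGreatest_le _
  rcases lt_trichotomy m' (landN board c) with h | h | h
  · exact absurd hspec (h2 _ h (by omega))
  · exact h
  · exact absurd h1 (Nat.findGreatest_is_greatest h (by omega))

lemma place_length (board : List (List String)) (player : String) (c : Nat) :
    (placeG board player c).length = board.length := by
  simp [placeG]

lemma place_headD_len (board : List (List String)) (player : String) (c : Nat) (hb : board ≠ []) :
    ((placeG board player c).headD []).length = (board.headD []).length := by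
  cases board with
  | nil => exact absurd rfl hb
  | cons hd tl =>
    cases hm : landN (hd :: tl) c with
    | zero => simp [placeG, hm, List.set_cons_zero]
    | succ n => simp [placeG, hm, List.set_cons_succ]

lemma foldA (board : List (List String)) (player : String)
    (hb : board ≠ []) (hpl : player ≠ ".")
    (rect : ∀ row ∈ board, row.length = (board.headD []).length)
    (grav : ∀ c' < (board.headD []).length, cB board 0 c' = "." →
        ∀ r2 < board.length, ∀ r1 < r2,
        cB board r1 c' ≠ "." → cB board r2 c' ≠ ".") :
    ∀ (cs : List Int) (acc : List Int),
      (∀ x ∈ cs, 0 ≤ x ∧ x.toNat < (board.headD []).length ∧ cB board 0 x.toNat = ".") →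
      (cs.foldl (fun (st : List (List String) × List Int) col =>
        match drop_in_grid_port st.1 col player with
        | (g, none) => (g, st.2)
        | (g, some pos) =>
          let wins := if check_win_cells_port g pos.1 pos.2 player ≠ [] then st.2 ++ [col] else st.2
          (undo_in_grid_port g col, wins)) (board, acc)).2
      = acc ++ cs.filter (fun col => decide (winPred board player col)) := by
  intro cs
  induction cs with
  | nil => intro acc _; simp
  | cons col cs ih =>
    intro acc hcs
    obtain ⟨hnn, hcw, h0⟩ := hcs col (by simp)
    have hcol : col = ((col.toNat : Nat) : Int) := by omega
    obtain ⟨hmH, hmc, hup, hdown⟩ := land_spec board col.toNat hb hcw h0 grav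
    have hrl : (board.getD (landN board col.toNat) []).length = (board.headD []).length :=
      rowlen_rect board rect _ hmH
    have hdrop : drop_in_grid_port board col player =
        (placeG board player col.toNat, some (((landN board col.toNat : Nat) : Int), ((col.toNat : Nat) : Int))) := by
      rw [hcol]
      exact drop_spec board player col.toNat (landN board col.toNat) hmH hmc hup
    have hundo : undo_in_grid_port (placeG board player col.toNat) col = board := by
      rw [hcol]
      exact undo_spec board player col.toNat (landN board col.toNat) hpl hmH hmc (by omega) hdown
    rw [List.foldl_cons]
    simp only [hdrop, hundo]
    rw [ih]
    · by_cases hw : winPred board player col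
      · have hw' : check_win_cells_port (placeG board player col.toNat)
            ((landN board col.toNat : Nat) : Int) ((col.toNat : Nat) : Int) player ≠ [] := by
          rw [← hcol]; exact hw
        rw [if_pos hw', List.filter_cons, if_pos (by simpa using hw)]
        simp
      · have hw' : ¬ check_win_cells_port (placeG board player col.toNat)
            ((landN board col.toNat : Nat) : Int) ((col.toNat : Nat) : Int) player ≠ [] := by
          rw [← hcol]; exact hw
        rw [if_neg hw', List.filter_cons, if_neg (by simpa using hw)]
    · intro x hx; exact hcs x (by simp [hx])

lemma mem_valid_iff (board : List (List String)) (x : Int) :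
    x ∈ valid_columns_port board ↔
      0 ≤ x ∧ x < ((board.headD []).length : Int) ∧ (board.headD []).getD x.toNat "" = "." := by
  unfold valid_columns_port
  split
  · rename_i h
    rcases h with h | h
    · subst h; simp
    · rw [h]; simp
  · rw [List.mem_filter]
    constructor
    · rintro ⟨hr, hc⟩
      obtain ⟨h1, h2⟩ := PySem.List.mem_pyRange_one.mp hr
      refine ⟨h1, h2, ?_⟩
      rw [PySem.List.pyGetD_of_nonneg _ _ h1] at hc
      simpa using hc
    · rintro ⟨h1, h2, hc⟩
      refine ⟨PySem.List.mem_pyRange_one.mpr ⟨h1, h2⟩, ?_⟩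
      rw [PySem.List.pyGetD_of_nonneg _ _ h1]
      simpa using hc

lemma A_reduce (board : List (List String)) (player : String)
    (hb : board ≠ []) (hpl : player ≠ ".")
    (rect : ∀ row ∈ board, row.length = (board.headD []).length)
    (grav : ∀ c' < (board.headD []).length, cB board 0 c' = "." →
        ∀ r2 < board.length, ∀ r1 < r2,
        cB board r1 c' ≠ "." → cB board r2 c' ≠ ".") :
    find_all_immediate_wins_py board player =
      (order_columns_center_first_port (valid_columns_port board)
        ((board.headD []).length : Int)).filter
        (fun col => decide (winPred board player col)) := by
  unfold find_all_immediate_wins_py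
  rw [foldA board player hb hpl rect grav _ [] ?_]
  · simp
  · intro x hx
    have hx' : x ∈ valid_columns_port board := by
      have := (PySem.List.sorted2_perm (valid_columns_port board)
        (fun c => |c - PySem.Int.floordiv ((board.headD []).length : Int) 2|)
        (fun c => c) false).mem_iff (a := x)
      unfold order_columns_center_first_port at hx
      exact this.mp hx
    obtain ⟨h1, h2, h3⟩ := (mem_valid_iff board x).mp hx'
    refine ⟨h1, by omega, ?_⟩
    unfold cB
    rw [getD_zero_headD board hb]
    exact h3

-- ---------- B-side bridges ----------
lemma pvAt_some_iff_rect (board : List (List String))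
    (rect : ∀ row ∈ board, row.length = (board.headD []).length) (r c : Int) (s : String) :
    pvAt board r c = some s ↔
      0 ≤ r ∧ r < (board.length : Int) ∧ 0 ≤ c ∧ c < ((board.headD []).length : Int) ∧
      pvCell board r c = s := by
  unfold pvAt
  by_cases hr : 0 ≤ r ∧ r < (board.length : Int)
  · have hrow : PySem.List.pyGetD board r [] = board.getD r.toNat [] :=
      PySem.List.pyGetD_of_nonneg _ _ hr.1
    have hlen : (board.getD r.toNat []).length = (board.headD []).length :=
      rowlen_rect board rect _ (by omega)
    by_cases hc : 0 ≤ c ∧ c < ((board.headD []).length : Int)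
    · rw [if_pos (by rw [hrow, hlen]; exact ⟨hr.1, hr.2, hc.1, hc.2⟩)]
      simp only [Option.some.injEq]
      unfold pvCell
      constructor
      · intro h; exact ⟨hr.1, hr.2, hc.1, hc.2, by rw [hrow] at h ⊢; exact h⟩
      · rintro ⟨_, _, _, _, h⟩; rw [hrow] at h ⊢; exact h
    · rw [if_neg (by rw [hrow, hlen]; intro ⟨_, _, h3, h4⟩; exact hc ⟨h3, h4⟩)]
      simp only [false_iff, reduceCtorEq]
      intro ⟨_, _, h3, h4, _⟩; exact hc ⟨h3, h4⟩
  · rw [if_neg (by intro ⟨h1, h2, _, _⟩; exact hr ⟨h1, h2⟩)]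
    simp only [false_iff, reduceCtorEq]
    intro ⟨h1, h2, _, _, _⟩; exact hr ⟨h1, h2⟩

lemma pvCell_place_ne (board : List (List String)) (player : String) (c0 : Nat) (r' c' : Int)
    (h0r : 0 ≤ r') (h0c : 0 ≤ c')
    (hne : r' ≠ ((landN board c0 : Nat) : Int) ∨ c' ≠ (c0 : Int)) :
    pvCell (placeG board player c0) r' c' = pvCell board r' c' := by
  unfold pvCell placeG
  rw [PySem.List.pyGetD_of_nonneg _ _ h0r, PySem.List.pyGetD_of_nonneg _ _ h0r]
  by_cases hrm : r'.toNat = landN board c0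
  · have hc' : c'.toNat ≠ c0 := by
      rcases hne with h | h
      · omega
      · omega
    rw [hrm]
    by_cases hmL : landN board c0 < board.length
    · have : (board.set (landN board c0) ((board.getD (landN board c0) []).set c0 player)).getD
          (landN board c0) [] = (board.getD (landN board c0) []).set c0 player := by
        simp [List.getD_eq_getElem?_getD, hmL]
      rw [this]
      rw [PySem.List.pyGetD_of_nonneg _ _ h0c, PySem.List.pyGetD_of_nonneg _ _ h0c]
      simp [List.getD_eq_getElem?_getD, List.getElem?_set_ne (by omega : c0 ≠ c'.toNat)]
    · rw [List.set_eq_of_length_le (by omega)]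
  · have : (board.set (landN board c0) ((board.getD (landN board c0) []).set c0 player)).getD
        r'.toNat [] = board.getD r'.toNat [] := by
      simp [List.getD_eq_getElem?_getD, List.getElem?_set_ne (by omega : landN board c0 ≠ r'.toNat)]
    rw [this]

lemma dir_ne (d : Int × Int) (hd : d ∈ pvDirsL) : d.1 ≠ 0 ∨ d.2 ≠ 0 := by
  simp only [pvDirsL, List.mem_cons, List.not_mem_nil, or_false] at hd
  rcases hd with rfl | rfl | rfl | rfl <;> simp

lemma pyRange4_map (f : Int → Option String) :
    (PySem.List.pyRange 0 4 1).map f = [f 0, f 1, f 2, f 3] := rfl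

lemma B_fwd (board : List (List String)) (player : String)
    (hb : board ≠ []) (hpl : player ≠ ".")
    (rect : ∀ row ∈ board, row.length = (board.headD []).length)
    (grav : ∀ c' < (board.headD []).length, cB board 0 c' = "." →
        ∀ r2 < board.length, ∀ r1 < r2,
        cB board r1 c' ≠ "." → cB board r2 c' ≠ ".")
    (r c : Int) (d : Int × Int) (hd : d ∈ pvDirsL) (x : Int)
    (haddP : addP board player r c d x) :
    x ∈ valid_columns_port board ∧ winPred board player x := by
  unfold addP at haddP
  obtain ⟨hcnt3, hcnt1, k, hkidx, hguard, hxe⟩ := haddP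
  subst hxe
  have hH1 : 1 ≤ board.length := List.length_pos_iff.mpr hb
  -- the four window cells
  have hF : ∀ j : Nat, j ≤ 3 →
      ((PySem.List.pyRange 0 4 1).map (fun kk => pvAt board (r + kk * d.1) (c + kk * d.2))).getD j
        (some player) = pvAt board (r + (j : Int) * d.1) (c + (j : Int) * d.2) := by
    intro j hj
    rw [pyRange4_map]
    have := getD_quad (fun j : Nat => pvAt board (r + (j : Int) * d.1) (c + (j : Int) * d.2))
      (some player) j hj
    simpa using this
  rw [pyRange4_map] at hcnt3 hcnt1 hkidx
  have hxy : (some player : Option String) ≠ some "." := by simpa using hpl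
  obtain ⟨k', hk'le, hk'idx, hall, hky⟩ := quad_facts _ _ _ _ (some player) (some ".") hxy hcnt3 hcnt1
  have hkk : k' = k := Option.some.inj (hk'idx.symm.trans hkidx)
  subst hkk
  have hFk : pvAt board (r + (k' : Int) * d.1) (c + (k' : Int) * d.2) = some "." := by
    have := hky
    rw [← pyRange4_map (fun kk => pvAt board (r + kk * d.1) (c + kk * d.2))] at this
    rwa [hF k' hk'le] at this
  have hFj : ∀ j : Nat, j ≤ 3 → j ≠ k' →
      pvAt board (r + (j : Int) * d.1) (c + (j : Int) * d.2) = some player := by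
    intro j hj hjk
    have := hall j hj hjk
    rw [← pyRange4_map (fun kk => pvAt board (r + kk * d.1) (c + kk * d.2))] at this
    rwa [hF j hj] at this
  obtain ⟨her0, herH, hec0, hecW, hcellk⟩ := (pvAt_some_iff_rect board rect _ _ _).mp hFk
  rw [Bool.and_eq_true] at hguard
  obtain ⟨hg1, hg2⟩ := hguard
  have hg1' : pvAt board 0 (c + (k' : Int) * d.2) = some "." := by simpa using hg1
  obtain ⟨_, _, _, _, hcell0⟩ := (pvAt_some_iff_rect board rect _ _ _).mp hg1'
  have hg2' : ∀ j : Int, r + (k' : Int) * d.1 + 1 ≤ j → j < (board.length : Int) →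
      pvAt board j (c + (k' : Int) * d.2) ≠ some "." := by
    intro j h1 h2
    have := List.all_eq_true.mp hg2 j (PySem.List.mem_pyRange_one.mpr ⟨h1, h2⟩)
    simpa using this
  set c0 := (c + (k' : Int) * d.2).toNat with hc0
  have hecast : ((c0 : Nat) : Int) = c + (k' : Int) * d.2 := by omega
  set m0 := (r + (k' : Int) * d.1).toNat with hm0
  have hercast : ((m0 : Nat) : Int) = r + (k' : Int) * d.1 := by omega
  have h0col : cB board 0 c0 = "." := by
    have h := hcell0
    rw [← hecast] at h
    rw [show (0 : Int) = ((0 : Nat) : Int) from rfl, pvCell_cast] at h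
    exact h
  have hmcell : cB board m0 c0 = "." := by
    have h := hcellk
    rw [← hecast, ← hercast, pvCell_cast] at h
    exact h
  have hc0W : c0 < (board.headD []).length := by omega
  have hbelow : ∀ ρ, m0 < ρ → ρ < board.length → cB board ρ c0 ≠ "." := by
    intro ρ h1 h2 hcontra
    apply hg2' (ρ : Int) (by omega) (by omega)
    rw [← hecast]
    refine (pvAt_some_iff_rect board rect _ _ _).mpr ⟨by omega, by omega, by omega, by omega, ?_⟩
    rw [pvCell_cast]
    exact hcontra
  have hland : m0 = landN board c0 := land_unique board c0 m0 hb hc0W h0col (by omega) hmcell hbelow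
  constructor
  · exact (mem_valid_iff board _).mpr ⟨by omega, by omega, by
      have := h0col
      unfold cB at this
      rwa [getD_zero_headD board hb] at this⟩
  · unfold winPred check_win_cells_port
    rw [place_length, place_headD_len _ _ _ hb]
    rw [checkLoop_ne_nil_iff]
    refine ⟨d, hd, ?_⟩
    rw [checkDir_iff _ _ _ _ _ _ _ _ (by omega)]
    refine ⟨k', hk'le, ?_⟩
    intro j hj hjk
    have hFjv := hFj j hj hjk
    obtain ⟨hj0, hjH, hjc0, hjcW, hjcell⟩ := (pvAt_some_iff_rect board rect _ _ _).mp hFjv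
    have hjk' : ((j : Int) - (k' : Int)) ≠ 0 := by omega
    have hposr : ((landN board c0 : Nat) : Int) + ((j : Int) - (k' : Int)) * d.1
        = r + (j : Int) * d.1 := by rw [← hland, hercast]; ring
    have hposc : c + (k' : Int) * d.2 + ((j : Int) - (k' : Int)) * d.2
        = c + (j : Int) * d.2 := by ring
    have hne : r + (j : Int) * d.1 ≠ ((landN board c0 : Nat) : Int) ∨
        c + (j : Int) * d.2 ≠ ((c0 : Nat) : Int) := by
      rcases dir_ne d hd with h | h
      · left
        rw [← hland, hercast]
        intro heq
        exact mul_ne_zero hjk' h (by linarith)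
      · right
        rw [hecast]
        intro heq
        exact mul_ne_zero hjk' h (by linarith)
    unfold goodP
    refine ⟨by rw [hposr]; omega, by rw [hposr]; omega, by rw [hposc]; omega, by rw [hposc]; omega, ?_⟩
    rw [hposr, hposc]
    rw [pvCell_place_ne board player c0 _ _ (by omega) (by omega) hne]
    simp [hjcell]

lemma B_bwd (board : List (List String)) (player : String)
    (hb : board ≠ []) (hpl : player ≠ ".")
    (rect : ∀ row ∈ board, row.length = (board.headD []).length)
    (grav : ∀ c' < (board.headD []).length, cB board 0 c' = "." →
        ∀ r2 < board.length, ∀ r1 < r2,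
        cB board r1 c' ≠ "." → cB board r2 c' ≠ ".")
    (x : Int) (hxv : x ∈ valid_columns_port board) (hwin : winPred board player x) :
    x ∈ bSet board player := by
  obtain ⟨hx0, hxW, hxcol⟩ := (mem_valid_iff board x).mp hxv
  have hH1 : 1 ≤ board.length := List.length_pos_iff.mpr hb
  have hxcast : ((x.toNat : Nat) : Int) = x := by omega
  have h0col : cB board 0 x.toNat = "." := by
    unfold cB
    rw [getD_zero_headD board hb]
    exact hxcol
  have hc0W : x.toNat < (board.headD []).length := by omega
  obtain ⟨hmH, hmc, hup, hdown⟩ := land_spec board x.toNat hb hc0W h0col grav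
  unfold winPred check_win_cells_port at hwin
  rw [place_length, place_headD_len _ _ _ hb] at hwin
  rw [checkLoop_ne_nil_iff] at hwin
  obtain ⟨d, hd, h4⟩ := hwin
  rw [checkDir_iff _ _ _ _ _ _ _ _ (by omega)] at h4
  obtain ⟨k, hk, hw⟩ := h4
  have hcellj : ∀ j : Nat, j ≤ 3 → j ≠ k →
      pvAt board (((landN board x.toNat : Nat) : Int) + ((j : Int) - (k : Int)) * d.1)
        (x + ((j : Int) - (k : Int)) * d.2) = some player := by
    intro j hj hjk
    have hg := hw j hj hjk
    unfold goodP at hg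
    obtain ⟨h1, h2, h3, h4', h5⟩ := hg
    have hjk' : ((j : Int) - (k : Int)) ≠ 0 := by omega
    have hne : ((landN board x.toNat : Nat) : Int) + ((j : Int) - (k : Int)) * d.1
          ≠ ((landN board x.toNat : Nat) : Int) ∨
        x + ((j : Int) - (k : Int)) * d.2 ≠ ((x.toNat : Nat) : Int) := by
      rcases dir_ne d hd with h | h
      · left; intro heq; exact mul_ne_zero hjk' h (by linarith)
      · right; rw [hxcast]; intro heq; exact mul_ne_zero hjk' h (by linarith)
    rw [pvCell_place_ne board player x.toNat _ _ h1 h3 hne] at h5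
    exact (pvAt_some_iff_rect board rect _ _ _).mpr ⟨h1, h2, h3, h4', by simpa using h5⟩
  have hcellk : pvAt board ((landN board x.toNat : Nat) : Int) x = some "." := by
    refine (pvAt_some_iff_rect board rect _ _ _).mpr ⟨by omega, by omega, hx0, hxW, ?_⟩
    rw [← hxcast, pvCell_cast]
    exact hmc
  -- bounds of the window start
  have hbounds : 0 ≤ ((landN board x.toNat : Nat) : Int) - (k : Int) * d.1 ∧
      ((landN board x.toNat : Nat) : Int) - (k : Int) * d.1 < (board.length : Int) ∧
      0 ≤ x - (k : Int) * d.2 ∧ x - (k : Int) * d.2 < ((board.headD []).length : Int) := by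
    rcases Nat.eq_zero_or_pos k with rfl | hkpos
    · simp only [Nat.cast_zero, zero_mul, sub_zero]
      exact ⟨by omega, by omega, hx0, hxW⟩
    · have hg := hw 0 (by omega) (by omega)
      unfold goodP at hg
      obtain ⟨h1, h2, h3, h4', _⟩ := hg
      have e1 : ((landN board x.toNat : Nat) : Int) + (((0 : Nat) : Int) - (k : Int)) * d.1
          = ((landN board x.toNat : Nat) : Int) - (k : Int) * d.1 := by push_cast; ring
      have e2 : x + (((0 : Nat) : Int) - (k : Int)) * d.2 = x - (k : Int) * d.2 := by
        push_cast; ring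
      rw [e1] at h1 h2
      rw [e2] at h3 h4'
      exact ⟨h1, h2, h3, h4'⟩
  -- window entries of B's scan
  have hE : ∀ j : Nat, j ≤ 3 →
      pvAt board ((((landN board x.toNat : Nat) : Int) - (k : Int) * d.1) + (j : Int) * d.1)
        ((x - (k : Int) * d.2) + (j : Int) * d.2)
      = (if j = k then some "." else some player) := by
    intro j hj
    by_cases hjk : j = k
    · subst hjk
      rw [if_pos rfl]
      have e1 : (((landN board x.toNat : Nat) : Int) - (j : Int) * d.1) + (j : Int) * d.1
          = ((landN board x.toNat : Nat) : Int) := by ring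
      have e2 : (x - (j : Int) * d.2) + (j : Int) * d.2 = x := by ring
      rw [e1, e2]
      exact hcellk
    · rw [if_neg hjk]
      have e1 : (((landN board x.toNat : Nat) : Int) - (k : Int) * d.1) + (j : Int) * d.1
          = ((landN board x.toNat : Nat) : Int) + ((j : Int) - (k : Int)) * d.1 := by ring
      have e2 : (x - (k : Int) * d.2) + (j : Int) * d.2
          = x + ((j : Int) - (k : Int)) * d.2 := by ring
      rw [e1, e2]
      exact hcellj j hj hjk
  have hE0 : pvAt board ((((landN board x.toNat : Nat) : Int) - (k : Int) * d.1) + 0 * d.1)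
      ((x - (k : Int) * d.2) + 0 * d.2) = (if (0 : Nat) = k then some "." else some player) := by
    convert hE 0 (by omega) using 4 <;> norm_num
  have hE1 : pvAt board ((((landN board x.toNat : Nat) : Int) - (k : Int) * d.1) + 1 * d.1)
      ((x - (k : Int) * d.2) + 1 * d.2) = (if (1 : Nat) = k then some "." else some player) := by
    convert hE 1 (by omega) using 4 <;> norm_num
  have hE2 : pvAt board ((((landN board x.toNat : Nat) : Int) - (k : Int) * d.1) + 2 * d.1)
      ((x - (k : Int) * d.2) + 2 * d.2) = (if (2 : Nat) = k then some "." else some player) := by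
    convert hE 2 (by omega) using 4 <;> norm_num
  have hE3 : pvAt board ((((landN board x.toNat : Nat) : Int) - (k : Int) * d.1) + 3 * d.1)
      ((x - (k : Int) * d.2) + 3 * d.2) = (if (3 : Nat) = k then some "." else some player) := by
    convert hE 3 (by omega) using 4 <;> norm_num
  have hpl' : ("." : String) ≠ player := Ne.symm hpl
  rw [mem_bSet]
  refine ⟨((landN board x.toNat : Nat) : Int) - (k : Int) * d.1,
    PySem.List.mem_pyRange_one.mpr ⟨hbounds.1, hbounds.2.1⟩,
    x - (k : Int) * d.2, ?_, d, hd, ?_⟩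
  · rw [if_neg hb]
    exact PySem.List.mem_pyRange_one.mpr ⟨hbounds.2.2.1, hbounds.2.2.2⟩
  · unfold addP
    refine ⟨?_, ?_, k, ?_, ?_, by ring⟩
    · rw [pyRange4_map, hE0, hE1, hE2, hE3]
      interval_cases k <;> simp [hpl, hpl']
    · rw [pyRange4_map, hE0, hE1, hE2, hE3]
      interval_cases k <;> simp [hpl, hpl']
    · rw [pyRange4_map, hE0, hE1, hE2, hE3]
      have hnp : (some player : Option String) ≠ some "." := by simpa using hpl
      interval_cases k <;> norm_num <;>
        simp only [← PySem.List.index?_eq_idxOf?, PySem.List.index?_cons_of_ne _ hnp,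
          PySem.List.index?_cons_self, Option.map_some, Option.map_none] <;> rfl
    · rw [Bool.and_eq_true]
      constructor
      · have e : (x - (k : Int) * d.2) + (k : Int) * d.2 = x := by ring
        rw [e]
        have : pvAt board 0 x = some "." := by
          refine (pvAt_some_iff_rect board rect _ _ _).mpr ⟨le_refl 0, by omega, hx0, hxW, ?_⟩
          rw [← hxcast, show (0 : Int) = ((0 : Nat) : Int) from rfl, pvCell_cast]
          exact h0col
        simp [this]
      · rw [List.all_eq_true]
        intro j hj
        have e : (((landN board x.toNat : Nat) : Int) - (k : Int) * d.1) + (k : Int) * d.1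
            = ((landN board x.toNat : Nat) : Int) := by ring
        rw [e] at hj
        obtain ⟨hj1, hj2⟩ := PySem.List.mem_pyRange_one.mp hj
        have e2 : (x - (k : Int) * d.2) + (k : Int) * d.2 = x := by ring
        rw [e2]
        simp only [Bool.not_eq_eq_eq_not, Bool.not_true, beq_eq_false_iff_ne, ne_eq]
        intro hcontra
        obtain ⟨_, _, _, _, hcell⟩ := (pvAt_some_iff_rect board rect _ _ _).mp hcontra
        apply hup j.toNat (by omega) (by omega)
        rw [show j = ((j.toNat : Nat) : Int) by omega, ← hxcast, pvCell_cast] at hcell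
        exact hcell

-- ---------- sorted2 = sorted with a lexicographic key ----------
lemma insertBy_congr {α : Type} (p q : α → α → Bool) (h : ∀ a b, p a b = q a b) :
    ∀ (x : α) (l : List α), PySem.List.insertBy p x l = PySem.List.insertBy q x l := by
  intro x l
  induction l with
  | nil => rfl
  | cons y ys ih =>
    show (if p x y then x :: y :: ys else y :: PySem.List.insertBy p x ys)
       = (if q x y then x :: y :: ys else y :: PySem.List.insertBy q x ys)
    rw [h, ih]

lemma sorted2_eq_sorted_lex (xs : List Int) (k1 : Int → Int) :
    PySem.List.sorted2 xs k1 (fun c => c) false =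
      PySem.List.sorted xs (fun c => toLex (k1 c, c)) false := by
  rw [PySem.List.sorted_eq_foldl_insertBy]
  unfold PySem.List.sorted2
  apply PySem.List.foldl_congr_mem
  intro acc y _
  apply insertBy_congr
  intro a b
  by_cases h1 : k1 a < k1 b <;> by_cases h2 : k1 b < k1 a <;> by_cases h3 : a < b <;>
    simp [Prod.Lex.lt_iff, h1, h2, h3] <;> omega

lemma Kinj (center : Int) : Function.Injective (fun col : Int => toLex (|col - center|, col)) := by
  intro a b h
  have := congrArg (fun z : Lex (Int × Int) => (ofLex z).2) h
  simpa using this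

-- ===== VERDICT (by name: the statement is the Claim_ definition above) =====
theorem find_all_immediate_wins_py_spec : Claim_equal_find_all_immediate_wins_py := by
  intro board player hdom hpre
  obtain ⟨hb, himp⟩ := hpre
  unfold Spec_find_all_immediate_wins_py
  by_cases hex : ∃ c < (board.headD []).length, (board.headD []).getD c "" = "."
  · obtain ⟨hpl, rect, grav0⟩ := himp hex
    have grav : ∀ c' < (board.headD []).length, cB board 0 c' = "." →
        ∀ r2 < board.length, ∀ r1 < r2,
        cB board r1 c' ≠ "." → cB board r2 c' ≠ "." := by
      intro c' hc' h0c' r2 hr2 r1 hr1 hne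
      refine grav0 c' hc' r2 hr2 r1 hr1 ⟨?_, hne⟩
      have := h0c'
      unfold cB at this
      rwa [getD_zero_headD board hb] at this
    rw [A_reduce board player hb hpl rect grav, alt_eq_bSet]
    rw [if_neg hb]
    unfold order_columns_center_first_port
    rw [sorted2_eq_sorted_lex, sorted2_eq_sorted_lex]
    set center := PySem.Int.floordiv ((board.headD []).length : Int) 2 with hcenter
    set K := fun col : Int => toLex (|col - center|, col) with hK
    have hndvalid : (valid_columns_port board).Nodup := by
      unfold valid_columns_port
      split
      · exact List.nodup_nil
      · exact (PySem.List.nodup_pyRange_one _ _).filter _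
    have hndsorted : (PySem.List.sorted (valid_columns_port board) K).Nodup :=
      ((PySem.List.sorted_perm (valid_columns_port board) K false).nodup_iff).mpr hndvalid
    have hndfilter : ((PySem.List.sorted (valid_columns_port board) K).filter
        (fun col => decide (winPred board player col))).Nodup := hndsorted.filter _
    symm
    apply PySem.List.sorted_eq_of_perm_of_pairwise_lt
    · apply (List.perm_ext_iff_of_nodup hndfilter (nodup_bSet board player)).mpr
      intro a
      rw [List.mem_filter, PySem.List.mem_sorted]
      constructor
      · rintro ⟨hav, hap⟩
        exact B_bwd board player hb hpl rect grav a hav (of_decide_eq_true hap)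
      · intro hab
        obtain ⟨r, _, c, _, d, hd, hadd⟩ := (mem_bSet board player a).mp hab
        obtain ⟨h1, h2⟩ := B_fwd board player hb hpl rect grav r c d hd a hadd
        exact ⟨h1, decide_eq_true h2⟩
    · have hpw : (PySem.List.sorted (valid_columns_port board) K).Pairwise
          (fun a b => K a ≤ K b) := PySem.List.sorted_pairwise _ _
      have hpwf := hpw.sublist (List.filter_sublist (p := fun col => decide (winPred board player col)))
      have := hpwf.and hndfilter
      exact this.imp (fun {a b} ⟨hle, hne⟩ => lt_of_le_of_ne hle (fun he => hne (Kinj center he)))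
  · have hvalid : valid_columns_port board = [] := by
      rw [List.eq_nil_iff_forall_not_mem]
      intro a ha
      obtain ⟨h1, h2, h3⟩ := (mem_valid_iff board a).mp ha
      exact hex ⟨a.toNat, by omega, h3⟩
    have hA : find_all_immediate_wins_py board player = [] := by
      unfold find_all_immediate_wins_py order_columns_center_first_port
      rw [hvalid]
      rfl
    have hBset : bSet board player = [] := by
      rw [List.eq_nil_iff_forall_not_mem]
      intro a ha
      obtain ⟨r, hr, c, hc, d, hd, hadd⟩ := (mem_bSet board player a).mp ha
      unfold addP at hadd
      obtain ⟨_, _, k, hkidx, hguard, _⟩ := hadd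
      rw [Bool.and_eq_true] at hguard
      have hg1 : pvAt board 0 (c + (k : Int) * d.2) = some "." := by simpa using hguard.1
      unfold pvAt at hg1
      split at hg1
      · rename_i hcond
        obtain ⟨_, _, hc0, hcl⟩ := hcond
        rw [PySem.List.pyGetD_of_nonneg _ _ (le_refl 0)] at hg1 hcl
        have h0 : ((0 : Int).toNat) = 0 := rfl
        rw [h0] at hg1 hcl
        rw [getD_zero_headD board hb] at hg1 hcl
        rw [PySem.List.pyGetD_of_nonneg _ _ hc0] at hg1
        apply hex
        refine ⟨(c + (k : Int) * d.2).toNat, by omega, by simpa using hg1⟩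
      · cases hg1
    rw [hA, alt_eq_bSet, hBset]
    rfl
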